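-- pv_equiv track=rewrite | github.com/Maks3w/fiware-sinfonier | sinfonier-backend-api/clustering/storm/TopologyBuilder.py | list_of_modules_by_type
-- ===== SOURCE A (Python) =====
-- def list_of_modules_by_type(t_modules):
--     modules = dict()
--     modules["spouts"] = list()
--     modules["bolts"] = list()
--     modules["drains"] = list()
--
--     for module in t_modules:
--         if module["type"] in ["spout", "bolt", "drain"]:
--             modules[module["type"] + "s"].append(module)
--
--     return modules
-- ===== SOURCE B (Python) =====
-- def list_of_modules_by_type(t_modules):
--     return {
--         "spouts": [m for m in t_modules if m["type"] == "spout"],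
--         "bolts": [m for m in t_modules if m["type"] == "bolt"],
--         "drains": [m for m in t_modules if m["type"] == "drain"],
--     }
-- ===== Notes on version B (the rewrite author's own statement) =====
-- stated objective: alternative
-- what changed: A makes one pass maintaining a mutable dict of three lists with a membership test per element; B builds the dict literal directly from three independent comprehensions, one exact-equality filter per type.
import Mathlib
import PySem

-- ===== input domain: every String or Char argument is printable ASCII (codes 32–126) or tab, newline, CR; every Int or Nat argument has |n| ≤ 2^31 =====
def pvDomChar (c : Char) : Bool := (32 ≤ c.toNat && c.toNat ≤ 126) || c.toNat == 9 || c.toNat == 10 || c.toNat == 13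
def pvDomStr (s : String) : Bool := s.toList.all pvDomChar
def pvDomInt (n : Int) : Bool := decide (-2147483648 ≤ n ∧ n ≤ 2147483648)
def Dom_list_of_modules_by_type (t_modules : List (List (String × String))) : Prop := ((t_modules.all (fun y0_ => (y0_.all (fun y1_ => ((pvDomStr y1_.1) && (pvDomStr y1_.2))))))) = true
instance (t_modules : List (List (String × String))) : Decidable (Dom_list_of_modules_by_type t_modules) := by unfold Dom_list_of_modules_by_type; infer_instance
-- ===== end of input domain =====

-- B replaces A's single pass over a mutable dict of three lists by a dict literal of three independent per-type filters.

-- ===== PORT A =====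
-- module["type"] as Python dict lookup (first match); none = KeyError, excluded by Pre_.
def lmbtTypeA (module : List (String × String)) : Option String :=
  (PySem.Dict.mk module).get? "type"

def list_of_modules_by_type (t_modules : List (List (String × String))) : List (String × List (List (String × String))) :=
  let modules : PySem.Dict String (List (List (String × String))) :=
    ((PySem.Dict.empty.insert "spouts" []).insert "bolts" []).insert "drains" []
  (t_modules.foldl (fun d module =>
    match lmbtTypeA module with
    | some t =>
        if t = "spout" ∨ t = "bolt" ∨ t = "drain" then
          d.modify (t ++ "s") [] (fun l => l ++ [module])
        else d
    | none => d) modules).items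

-- ===== PORT B =====
def list_of_modules_by_type_alt (t_modules : List (List (String × String))) : List (String × List (List (String × String))) :=
  [("spouts", t_modules.filter (fun m => (PySem.Dict.mk m).get? "type" == some "spout")),
   ("bolts",  t_modules.filter (fun m => (PySem.Dict.mk m).get? "type" == some "bolt")),
   ("drains", t_modules.filter (fun m => (PySem.Dict.mk m).get? "type" == some "drain"))]

-- ===== PRECONDITION & SPEC =====
-- Pre_ excludes exactly the inputs where the Python A raises KeyError: a module without a "type" key.
def Pre_list_of_modules_by_type (t_modules : List (List (String × String))) : Prop :=
  (t_modules.all (fun m => (PySem.Dict.mk m).contains "type")) = true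
instance (t_modules : List (List (String × String))) : Decidable (Pre_list_of_modules_by_type t_modules) := by unfold Pre_list_of_modules_by_type; infer_instance

def pvWitness_list_of_modules_by_type : (List (List (String × String))) :=
  [[("type", "spout"), ("name", "s1")], [("type", "bolt")], [("type", "other")]]

def Spec_list_of_modules_by_type (t_modules : List (List (String × String))) (out : List (String × List (List (String × String)))) : Prop := out = list_of_modules_by_type_alt t_modules
instance (t_modules : List (List (String × String))) (out : List (String × List (List (String × String)))) : Decidable (Spec_list_of_modules_by_type t_modules out) := by unfold Spec_list_of_modules_by_type; infer_instance

-- ===== CLAIM (what is proved, stated in full; the proofs are below) =====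
def Claim_equal_list_of_modules_by_type : Prop := ∀ (t_modules : List (List (String × String))), Dom_list_of_modules_by_type t_modules → Pre_list_of_modules_by_type t_modules → Spec_list_of_modules_by_type t_modules (list_of_modules_by_type t_modules)

-- ===== LEMMAS AND PROOFS =====

-- Invariant of A's loop: starting from the three-key dict with accumulators s, b, d,
-- the loop appends to each list exactly the modules of that type, in order.
theorem lmbt_inv (l : List (List (String × String)))
    (s b d : List (List (String × String))) :
    (l.foldl (fun dd module =>
        match lmbtTypeA module with
        | some t =>
            if t = "spout" ∨ t = "bolt" ∨ t = "drain" then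
              dd.modify (t ++ "s") [] (fun l => l ++ [module])
            else dd
        | none => dd)
      (PySem.Dict.mk [("spouts", s), ("bolts", b), ("drains", d)])).items
    = [("spouts", s ++ l.filter (fun m => lmbtTypeA m == some "spout")),
       ("bolts",  b ++ l.filter (fun m => lmbtTypeA m == some "bolt")),
       ("drains", d ++ l.filter (fun m => lmbtTypeA m == some "drain"))] := by
  induction l generalizing s b d with
  | nil => simp
  | cons m rest ih =>
    simp only [List.foldl_cons, List.filter_cons]
    cases h : lmbtTypeA m with
    | none => simp [ih]
    | some t =>
      by_cases hs : t = "spout"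
      · subst hs
        have : (PySem.Dict.mk [("spouts", s), ("bolts", b), ("drains", d)]).modify
            "spouts" [] (fun l => l ++ [m])
            = PySem.Dict.mk [("spouts", s ++ [m]), ("bolts", b), ("drains", d)] := by
          rfl
        have key : ("spout" : String) ++ "s" = "spouts" := rfl
        simp [key, this, ih]
      · by_cases hb : t = "bolt"
        · subst hb
          have : (PySem.Dict.mk [("spouts", s), ("bolts", b), ("drains", d)]).modify
              "bolts" [] (fun l => l ++ [m])
              = PySem.Dict.mk [("spouts", s), ("bolts", b ++ [m]), ("drains", d)] := by
            rfl
          have key : ("bolt" : String) ++ "s" = "bolts" := rfl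
          simp [key, this, ih, hs]
        · by_cases hd : t = "drain"
          · subst hd
            have : (PySem.Dict.mk [("spouts", s), ("bolts", b), ("drains", d)]).modify
                "drains" [] (fun l => l ++ [m])
                = PySem.Dict.mk [("spouts", s), ("bolts", b), ("drains", d ++ [m])] := by
              rfl
            have key : ("drain" : String) ++ "s" = "drains" := rfl
            simp [key, this, ih, hs, hb]
          · simp [hs, hb, hd, ih]

-- ===== VERDICT (by name: the statement is the Claim_ definition above) =====
theorem list_of_modules_by_type_spec : Claim_equal_list_of_modules_by_type := by
  intro t_modules _ _
  show list_of_modules_by_type t_modules = list_of_modules_by_type_alt t_modules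
  have hinit : ((PySem.Dict.empty.insert "spouts" ([] : List (List (String × String)))).insert "bolts" []).insert "drains" []
      = PySem.Dict.mk [("spouts", []), ("bolts", []), ("drains", [])] := rfl
  unfold list_of_modules_by_type list_of_modules_by_type_alt
  rw [hinit, lmbt_inv]
  simp [lmbtTypeA]
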